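-- pv_equiv track=rewrite | github.com/artmerinov/NER | visualisation.py | highlight_entities
-- ===== SOURCE A (Python) =====
-- def get_tag_colors():
--     tag_colors = {
--         "art": '#1f77b4',
--         "building": '#ff7f0e',
--         "event": '#2ca02c',
--         "location": '#d62728',
--         "organization": '#9467bd',
--         "other": '#8c564b',
--         "person": '#e377c2',
--         "product": '#7f7f7f'
--     }
--     return tag_colors
--
-- def highlight_entities(tokens, ner_tags, font_size=18):
--     highlighted_text = ""
--     current_entity = None
--     tag_colors = get_tag_colors()
--
--     for token, tag in zip(tokens, ner_tags):
--         if tag.startswith("B-"):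
--             if current_entity:
--                 highlighted_text += f"</span> ({current_entity}) "
--             entity_type = tag[2:]
--             color = tag_colors.get(entity_type, 'grey')  # Default to grey if the color is not found
--             highlighted_text += f"<span style='color:{color}'>{token} "
--             current_entity = entity_type
--         elif tag == "O":
--             if current_entity:
--                 highlighted_text += f"</span> ({current_entity}) {token} "
--                 current_entity = None
--             else:
--                 highlighted_text += f"{token} "
--         elif tag.startswith("I-"):
--             if current_entity:
--                 highlighted_text += f"{token} "
--             else:
--                 highlighted_text += f"{token} "
--
--     if current_entity:
--         highlighted_text += f"</span> ({current_entity}) "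
--
--     # Highlight NER names in parenthesis
--     highlighted_text = highlighted_text.replace("(", "<span style='color:grey'>(").replace(")", ")</span>")
--
--     # Add overall style for font size
--     html_content = f"<div style='font-size:{font_size}px'>{highlighted_text}</div>"
--
--     return html_content.strip()  # Remove trailing space
-- ===== SOURCE B (Python) =====
-- def get_tag_colors():
--     tag_colors = {
--         "art": '#1f77b4',
--         "building": '#ff7f0e',
--         "event": '#2ca02c',
--         "location": '#d62728',
--         "organization": '#9467bd',
--         "other": '#8c564b',
--         "person": '#e377c2',
--         "product": '#7f7f7f'
--     }
--     return tag_colors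
--
-- def highlight_entities(tokens, ner_tags, font_size=18):
--     colors = get_tag_colors()
--     pairs = list(zip(tokens, ner_tags))
--
--     # Pass 1: the active entity type BEFORE each pair ("" = no active entity),
--     # advanced by the tag alone: B- opens tag[2:], O closes, anything else keeps it.
--     states = []
--     st = ""
--     for _, tag in pairs:
--         states.append(st)
--         if tag.startswith("B-"):
--             st = tag[2:]
--         elif tag == "O":
--             st = ""
--
--     # Pass 2: each pair renders independently from its tag and previous state.
--     def piece(token, tag, prev):
--         if tag.startswith("B-"):
--             opener = f"<span style='color:{colors.get(tag[2:], 'grey')}'>{token} "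
--             return (f"</span> ({prev}) " if prev else "") + opener
--         if tag == "O":
--             return f"</span> ({prev}) {token} " if prev else f"{token} "
--         if tag.startswith("I-"):
--             return f"{token} "
--         return ""
--
--     body = "".join(piece(t, g, s) for (t, g), s in zip(pairs, states))
--     if st:
--         body += f"</span> ({st}) "
--
--     # Mark parentheses in one character-level pass.
--     marked = "".join(
--         "<span style='color:grey'>(" if c == "(" else (")</span>" if c == ")" else c)
--         for c in body
--     )
--
--     return f"<div style='font-size:{font_size}px'>{marked}</div>".strip()
-- ===== Notes on version B (the rewrite author's own statement) =====
-- stated objective: alternative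
-- what changed: Replaces A's single stateful string-accumulating loop by two stateless passes (a prefix scan of the active entity type driven by tags alone, then an independent per-pair piece rendering joined at the end) and replaces the two global str.replace calls by one character-level translation pass.
import Mathlib
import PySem

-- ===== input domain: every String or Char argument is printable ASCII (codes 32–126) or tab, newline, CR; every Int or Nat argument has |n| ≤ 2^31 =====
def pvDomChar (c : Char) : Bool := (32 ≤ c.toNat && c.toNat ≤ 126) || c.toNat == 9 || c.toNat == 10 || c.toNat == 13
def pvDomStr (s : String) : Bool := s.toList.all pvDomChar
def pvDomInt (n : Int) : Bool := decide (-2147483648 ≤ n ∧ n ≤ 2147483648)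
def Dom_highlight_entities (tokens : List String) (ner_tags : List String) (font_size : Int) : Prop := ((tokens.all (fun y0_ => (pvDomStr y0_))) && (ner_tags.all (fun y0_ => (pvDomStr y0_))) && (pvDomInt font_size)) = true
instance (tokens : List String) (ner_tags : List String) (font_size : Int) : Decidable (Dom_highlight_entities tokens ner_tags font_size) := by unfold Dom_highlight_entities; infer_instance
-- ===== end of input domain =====

-- B restructures A's single stateful accumulating loop into two stateless passes (a tag-driven
-- prefix scan of the active entity type, then independent per-pair piece rendering joined at the
-- end) and turns the two global replace() calls into one character-level translation ('alternative').

-- ===== PORT A =====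
-- shared same-module helper get_tag_colors (identical in Source A and Source B)
def get_tag_colors : PySem.Dict String String :=
  PySem.Dict.ofList [("art", "#1f77b4"), ("building", "#ff7f0e"), ("event", "#2ca02c"),
    ("location", "#d62728"), ("organization", "#9467bd"), ("other", "#8c564b"),
    ("person", "#e377c2"), ("product", "#7f7f7f")]

-- Python truthiness of current_entity (None or a str): None and "" are falsy
def pvTruthy (cur : Option String) : Bool := !(cur.getD "" == "")

-- A's for-loop over zip(tokens, ner_tags), state = (highlighted_text, current_entity)
def pvLoopA : List (String × String) → String → Option String → String × Option String
  | [], acc, cur => (acc, cur)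
  | (token, tag) :: rest, acc, cur =>
    if PySem.Str.startswith tag "B-" then
      let acc1 := if pvTruthy cur then acc ++ "</span> (" ++ cur.getD "" ++ ") " else acc
      let entity_type := PySem.Str.slice tag (some 2) none
      let color := PySem.Dict.getD get_tag_colors entity_type "grey"
      pvLoopA rest (acc1 ++ "<span style='color:" ++ color ++ "'>" ++ token ++ " ") (some entity_type)
    else if tag == "O" then
      if pvTruthy cur then
        pvLoopA rest (acc ++ "</span> (" ++ cur.getD "" ++ ") " ++ token ++ " ") none
      else
        pvLoopA rest (acc ++ token ++ " ") cur
    else if PySem.Str.startswith tag "I-" then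
      if pvTruthy cur then pvLoopA rest (acc ++ token ++ " ") cur
      else pvLoopA rest (acc ++ token ++ " ") cur
    else pvLoopA rest acc cur

def highlight_entities (tokens : List String) (ner_tags : List String) (font_size : Int) : String :=
  let r := pvLoopA (tokens.zip ner_tags) "" none
  let ht := if pvTruthy r.2 then r.1 ++ "</span> (" ++ r.2.getD "" ++ ") " else r.1
  let ht2 := PySem.Str.replace (PySem.Str.replace ht "(" "<span style='color:grey'>(") ")" ")</span>"
  PySem.Str.strip ("<div style='font-size:" ++ PySem.Int.toStr font_size ++ "px'>" ++ ht2 ++ "</div>")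

-- ===== PORT B =====
-- next active-entity state after seeing a tag (Source B pass 1 loop body)
def pvNextState (tag : String) (st : String) : String :=
  if PySem.Str.startswith tag "B-" then PySem.Str.slice tag (some 2) none
  else if tag == "O" then "" else st

-- Source B's piece(token, tag, prev)
def pvPiece (token : String) (tag : String) (prev : String) : String :=
  if PySem.Str.startswith tag "B-" then
    let opener := "<span style='color:" ++
      PySem.Dict.getD get_tag_colors (PySem.Str.slice tag (some 2) none) "grey" ++ "'>" ++ token ++ " "
    (if !(prev == "") then "</span> (" ++ prev ++ ") " else "") ++ opener
  else if tag == "O" then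
    if !(prev == "") then "</span> (" ++ prev ++ ") " ++ token ++ " " else token ++ " "
  else if PySem.Str.startswith tag "I-" then token ++ " "
  else ""

-- Source B's per-character parenthesis marking
def pvTrChar (c : Char) : String :=
  if c == '(' then "<span style='color:grey'>(" else if c == ')' then ")</span>" else String.ofList [c]

def highlight_entities_alt (tokens : List String) (ner_tags : List String) (font_size : Int) : String :=
  let pairs := tokens.zip ner_tags
  let scan := pairs.foldl (fun p pr => (p.1 ++ [p.2], pvNextState pr.2 p.2)) (([] : List String), "")
  let body0 := PySem.Str.join "" ((pairs.zip scan.1).map (fun x => pvPiece x.1.1 x.1.2 x.2))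
  let body := if !(scan.2 == "") then body0 ++ "</span> (" ++ scan.2 ++ ") " else body0
  let marked := PySem.Str.join "" (body.toList.map pvTrChar)
  PySem.Str.strip ("<div style='font-size:" ++ PySem.Int.toStr font_size ++ "px'>" ++ marked ++ "</div>")

-- ===== PRECONDITION & SPEC =====
def Spec_highlight_entities (tokens : List String) (ner_tags : List String) (font_size : Int) (out : String) : Prop := out = highlight_entities_alt tokens ner_tags font_size
instance (tokens : List String) (ner_tags : List String) (font_size : Int) (out : String) : Decidable (Spec_highlight_entities tokens ner_tags font_size out) := by unfold Spec_highlight_entities; infer_instance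

-- ===== CLAIM (what is proved, stated in full; the proofs are below) =====
def Claim_equal_highlight_entities : Prop := ∀ (tokens : List String) (ner_tags : List String) (font_size : Int), Dom_highlight_entities tokens ner_tags font_size → Spec_highlight_entities tokens ner_tags font_size (highlight_entities tokens ner_tags font_size)

-- ===== LEMMAS AND PROOFS =====

-- the list of previous states Source B's first pass records
def pvStates : List (String × String) → String → List String
  | [], _ => []
  | (_, tag) :: r, s => s :: pvStates r (pvNextState tag s)

-- the final state of the first pass
def pvFin : List (String × String) → String → String
  | [], s => s
  | (_, tag) :: r, s => pvFin r (pvNextState tag s)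

-- the rendered body (without the final closer), as characters
def pvBody : List (String × String) → String → List Char
  | [], _ => []
  | (tok, tag) :: r, s => (pvPiece tok tag s).toList ++ pvBody r (pvNextState tag s)

theorem pvFoldl_scan (l : List (String × String)) (pref : List String) (s : String) :
    l.foldl (fun p pr => (p.1 ++ [p.2], pvNextState pr.2 p.2)) (pref, s)
      = (pref ++ pvStates l s, pvFin l s) := by
  induction l generalizing pref s with
  | nil => simp [pvStates, pvFin]
  | cons hd tl ih => cases hd with
    | mk tok tag => simp [pvStates, pvFin, List.foldl_cons, ih]

theorem pvFlatten_intersperse_nil (l : List (List Char)) :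
    (List.intersperse ([] : List Char) l).flatten = l.flatten := by
  induction l with
  | nil => simp
  | cons a t ih =>
    cases t with
    | nil => simp
    | cons b r => simpa [List.intersperse] using ih

theorem pvJoin_toList (L : List String) :
    (PySem.Str.join "" L).toList = (L.map String.toList).flatten := by
  simp [PySem.Str.join, PySem.Chars.join, List.intercalate, pvFlatten_intersperse_nil]

theorem pvJoin_pieces (l : List (String × String)) (s : String) :
    (PySem.Str.join "" ((l.zip (pvStates l s)).map (fun x => pvPiece x.1.1 x.1.2 x.2))).toList
      = pvBody l s := by
  induction l generalizing s with
  | nil => simp [pvStates, pvBody]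
  | cons hd tl ih =>
    cases hd with
    | mk tok tag =>
      rw [pvStates]
      simp only [List.zip_cons_cons, List.map_cons, pvJoin_toList, List.flatten_cons, pvBody]
      rw [← pvJoin_toList, ih]

theorem pvLoopA_eq (l : List (String × String)) (acc : String) (cur : Option String) :
    ((pvLoopA l acc cur).1).toList = acc.toList ++ pvBody l (cur.getD "")
      ∧ (pvLoopA l acc cur).2.getD "" = pvFin l (cur.getD "") := by
  induction l generalizing acc cur with
  | nil => simp [pvLoopA, pvBody, pvFin]
  | cons hd tl ih =>
    cases hd with
    | mk tok tag =>
      rw [pvLoopA]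
      by_cases hB : PySem.Str.startswith tag "B-" = true
      · rw [if_pos hB]
        refine ⟨?_, ?_⟩
        · rw [(ih _ _).1, pvBody, pvPiece, if_pos hB, pvNextState, if_pos hB]
          by_cases ht : pvTruthy cur = true
          · rw [if_pos ht]
            have hp : (!(cur.getD "" == "")) = true := ht
            simp [hp, List.append_assoc]
          · rw [if_neg ht]
            have hp : (!(cur.getD "" == "")) = false := by simpa [pvTruthy] using ht
            simp [hp, List.append_assoc]
        · rw [(ih _ _).2, pvFin, pvNextState, if_pos hB]
          simp
      · rw [if_neg hB]
        by_cases hO : (tag == "O") = true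
        · rw [if_pos hO]
          have hO' : tag = "O" := by simpa using hO
          by_cases ht : pvTruthy cur = true
          · rw [if_pos ht]
            have hp : (!(cur.getD "" == "")) = true := ht
            refine ⟨?_, ?_⟩
            · rw [(ih _ _).1, pvBody, pvPiece, if_neg hB, if_pos hO, pvNextState, if_neg hB, if_pos hO]
              simp [hp, List.append_assoc]
            · rw [(ih _ _).2, pvFin, pvNextState, if_neg hB, if_pos hO]
              simp
          · rw [if_neg ht]
            have hp : (cur.getD "" == "") = true := by simpa [pvTruthy] using ht
            have hcur : cur.getD "" = "" := by simpa using hp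
            refine ⟨?_, ?_⟩
            · rw [(ih _ _).1, pvBody, pvPiece, if_neg hB, if_pos hO, pvNextState, if_neg hB, if_pos hO]
              simp [hcur, List.append_assoc]
            · rw [(ih _ _).2, pvFin, pvNextState, if_neg hB, if_pos hO]
              rw [hcur]
        · rw [if_neg hO]
          have hnext : pvNextState tag (cur.getD "") = cur.getD "" := by
            rw [pvNextState, if_neg hB, if_neg hO]
          by_cases hI : PySem.Str.startswith tag "I-" = true
          · rw [if_pos hI]
            have hbody : pvBody ((tok, tag) :: tl) (cur.getD "")
                = (tok ++ " ").toList ++ pvBody tl (cur.getD "") := by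
              rw [pvBody, pvPiece, if_neg hB, if_neg hO, if_pos hI, hnext]
            by_cases ht : pvTruthy cur = true
            · rw [if_pos ht]
              exact ⟨by rw [(ih _ _).1, hbody]; simp [List.append_assoc],
                     by rw [(ih _ _).2, pvFin, hnext]⟩
            · rw [if_neg ht]
              exact ⟨by rw [(ih _ _).1, hbody]; simp [List.append_assoc],
                     by rw [(ih _ _).2, pvFin, hnext]⟩
          · rw [if_neg hI]
            have hbody : pvBody ((tok, tag) :: tl) (cur.getD "") = pvBody tl (cur.getD "") := by
              rw [pvBody, pvPiece, if_neg hB, if_neg hO, if_neg hI, hnext]; simp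
            exact ⟨by rw [(ih _ _).1, hbody], by rw [(ih _ _).2, pvFin, hnext]⟩

theorem pvGo_single (o : Char) (new : List Char) :
    ∀ (fuel : Nat) (l acc : List Char), l.length ≤ fuel →
      PySem.Chars.replace.go [o] new fuel l acc
        = acc.reverse ++ l.flatMap (fun c => if c == o then new else [c]) := by
  intro fuel
  induction fuel with
  | zero =>
    intro l acc h
    have : l = [] := by cases l <;> simp_all
    subst this; simp [PySem.Chars.replace.go]
  | succ n ih =>
    intro l acc h
    cases l with
    | nil => simp [PySem.Chars.replace.go]
    | cons c t =>
      rw [PySem.Chars.replace.go]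
      by_cases hc : c = o
      · subst hc
        simp only [List.isPrefixOf, BEq.rfl, Bool.and_self, if_pos]
        rw [ih _ _ (by simpa using Nat.le_of_succ_le_succ h)]
        simp
      · have hpre : List.isPrefixOf [o] (c :: t) = false := by
          simp [List.isPrefixOf]
          exact fun h' => absurd h'.symm hc
        rw [hpre]
        simp only [Bool.false_eq_true, if_false]
        rw [ih _ _ (by simpa using Nat.le_of_succ_le_succ h)]
        simp [hc]

theorem pvReplace_single (o : Char) (new : List Char) (l : List Char) :
    PySem.Chars.replace l [o] new = l.flatMap (fun c => if c == o then new else [c]) := by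
  rw [PySem.Chars.replace]
  simp [pvGo_single o new l.length l [] le_rfl]

theorem pvMarked_eq (l : List Char) :
    PySem.Chars.replace (PySem.Chars.replace l "(".toList "<span style='color:grey'>(".toList)
        ")".toList ")</span>".toList
      = (((l.map pvTrChar).map String.toList)).flatten := by
  have h1 : "(".toList = ['('] := by decide
  have h2 : ")".toList = [')'] := by decide
  rw [h1, h2, pvReplace_single, pvReplace_single, List.flatMap_assoc]
  rw [List.flatten_eq_flatMap]
  simp only [List.flatMap_map, id_eq]
  apply List.flatMap_congr  -- pointwise
  intro c _
  by_cases hc1 : c = '('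
  · subst hc1; decide
  · by_cases hc2 : c = ')'
    · subst hc2; decide
    · simp [pvTrChar, hc1, hc2]

-- ===== VERDICT (by name: the statement is the Claim_ definition above) =====
theorem pvFinal_eq (htA bodyB : String) (h : htA.toList = bodyB.toList) (fs : Int) :
    PySem.Str.strip ("<div style='font-size:" ++ PySem.Int.toStr fs ++ "px'>" ++
        (PySem.Str.replace (PySem.Str.replace htA "(" "<span style='color:grey'>(") ")" ")</span>") ++ "</div>")
      = PySem.Str.strip ("<div style='font-size:" ++ PySem.Int.toStr fs ++ "px'>" ++
        (PySem.Str.join "" (bodyB.toList.map pvTrChar)) ++ "</div>") := by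
  have hrepl : PySem.Str.replace (PySem.Str.replace htA "(" "<span style='color:grey'>(") ")" ")</span>"
      = PySem.Str.join "" (bodyB.toList.map pvTrChar) := by
    simp only [PySem.Str.replace, PySem.Str.join, PySem.Chars.join, List.intercalate]
    apply congrArg String.ofList
    simp only [String.toList_ofList]
    rw [h, pvMarked_eq, show ("".toList : List Char) = [] from rfl, pvFlatten_intersperse_nil]
  rw [hrepl]

theorem highlight_entities_spec : Claim_equal_highlight_entities := by
  intro tokens ner_tags font_size _hdom
  unfold Spec_highlight_entities
  unfold highlight_entities highlight_entities_alt
  apply pvFinal_eq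
  have hA := pvLoopA_eq (tokens.zip ner_tags) "" none
  rw [pvFoldl_scan]
  have ht : pvTruthy (pvLoopA (tokens.zip ner_tags) "" none).2
      = !(pvFin (tokens.zip ner_tags) "" == "") := by
    rw [pvTruthy]
    rw [show ((none : Option String).getD "") = "" from rfl] at hA
    rw [hA.2]
  rw [ht]
  rw [show ((none : Option String).getD "") = "" from rfl] at hA
  by_cases hb : (pvFin (tokens.zip ner_tags) "" == "") = true
  · simp only [hb, Bool.not_true, Bool.false_eq_true, if_false, List.nil_append]
    rw [hA.1, pvJoin_pieces]
    simp
  · have hb' : (pvFin (tokens.zip ner_tags) "" == "") = false := by simpa using hb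
    simp only [hb', Bool.not_false, if_true, List.nil_append]
    simp only [String.toList_append]
    rw [hA.1, hA.2, pvJoin_pieces]
    simp
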